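-- pv_equiv track=rewrite | github.com/the-amazing-atharva/Basic-to-Advance-Python-Programs | 18-buy8_get1free.py | getCostOfCoffe
-- ===== SOURCE A (Python) =====
-- def getCostOfCoffe(numberOfCoffees, pricePerCoffee):
--     totalPrice = 0
--     cupsUntilFreeCoffee = 8
--
--     while numberOfCoffees > 0:
--         # Decrement the number of coffees left to buy:
--         numberOfCoffees -= 1
--         # If this cup of coffee is free, reset the number to buy until
--         # a free cup back to 8:
--         if cupsUntilFreeCoffee == 0:
--             cupsUntilFreeCoffee = 8
--         else:
--             totalPrice += pricePerCoffee
--             cupsUntilFreeCoffee -= 1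
--
--     return totalPrice
-- ===== SOURCE B (Python) =====
-- def getCostOfCoffe(numberOfCoffees, pricePerCoffee):
--     # Closed form: every 9th cup is free (first 8 paid, 9th free, repeating).
--     paid = max(numberOfCoffees, 0)
--     return (paid - paid // 9) * pricePerCoffee
-- ===== Notes on version B (the rewrite author's own statement) =====
-- stated objective: faster
-- what changed: Replaces the per-cup while loop with closed-form arithmetic: paid cups = n - n//9 (clamped at 0), multiplied by the price.
import Mathlib
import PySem

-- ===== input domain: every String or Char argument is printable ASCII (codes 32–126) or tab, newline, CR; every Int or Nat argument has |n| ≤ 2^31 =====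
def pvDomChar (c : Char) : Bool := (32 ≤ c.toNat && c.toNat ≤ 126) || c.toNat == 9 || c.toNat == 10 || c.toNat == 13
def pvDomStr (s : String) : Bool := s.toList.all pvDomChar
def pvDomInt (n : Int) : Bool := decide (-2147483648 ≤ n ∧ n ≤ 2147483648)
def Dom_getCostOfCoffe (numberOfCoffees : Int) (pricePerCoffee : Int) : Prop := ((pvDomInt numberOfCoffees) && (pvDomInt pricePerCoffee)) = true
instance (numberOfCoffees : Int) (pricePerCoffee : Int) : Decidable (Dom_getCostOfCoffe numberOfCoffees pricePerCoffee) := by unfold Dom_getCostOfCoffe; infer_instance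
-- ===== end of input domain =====

-- B replaces A's per-cup while loop by closed-form arithmetic (paid = n - n//9, clamped at 0); objective: faster.
-- ===== PORT A =====
-- the while loop of A, step for step: state = (numberOfCoffees, totalPrice, cupsUntilFreeCoffee)
def getCostOfCoffeLoop (pricePerCoffee numberOfCoffees totalPrice cupsUntilFreeCoffee : Int) : Int :=
  if numberOfCoffees > 0 then
    if cupsUntilFreeCoffee = 0 then
      getCostOfCoffeLoop pricePerCoffee (numberOfCoffees - 1) totalPrice 8
    else
      getCostOfCoffeLoop pricePerCoffee (numberOfCoffees - 1) (totalPrice + pricePerCoffee) (cupsUntilFreeCoffee - 1)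
  else totalPrice
termination_by numberOfCoffees.toNat
decreasing_by all_goals omega

def getCostOfCoffe (numberOfCoffees : Int) (pricePerCoffee : Int) : Int :=
  getCostOfCoffeLoop pricePerCoffee numberOfCoffees 0 8

-- ===== PORT B =====
def getCostOfCoffe_alt (numberOfCoffees : Int) (pricePerCoffee : Int) : Int :=
  let paid := max numberOfCoffees 0
  (paid - PySem.Int.floordiv paid 9) * pricePerCoffee

-- ===== PRECONDITION & SPEC =====
def Spec_getCostOfCoffe (numberOfCoffees : Int) (pricePerCoffee : Int) (out : Int) : Prop := out = getCostOfCoffe_alt numberOfCoffees pricePerCoffee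
instance (numberOfCoffees : Int) (pricePerCoffee : Int) (out : Int) : Decidable (Spec_getCostOfCoffe numberOfCoffees pricePerCoffee out) := by unfold Spec_getCostOfCoffe; infer_instance

-- ===== CLAIM (what is proved, stated in full; the proofs are below) =====
def Claim_equal_getCostOfCoffe : Prop := ∀ (numberOfCoffees : Int) (pricePerCoffee : Int), Dom_getCostOfCoffe numberOfCoffees pricePerCoffee → Spec_getCostOfCoffe numberOfCoffees pricePerCoffee (getCostOfCoffe numberOfCoffees pricePerCoffee)

-- ===== LEMMAS AND PROOFS =====
-- Loop invariant: with k cups left and 0 ≤ c ≤ 8 cups until the next free one,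
-- the loop pays for k - (k + 8 - c)/9 of them.
theorem getCostOfCoffeLoop_eq (p : Int) : ∀ (k : Nat) (t c : Int), 0 ≤ c → c ≤ 8 →
    getCostOfCoffeLoop p (k : Int) t c = t + ((k : Int) - ((k : Int) + 8 - c) / 9) * p := by
  intro k
  induction k with
  | zero =>
    intro t c h0 h8
    simp only [Nat.cast_zero]
    rw [getCostOfCoffeLoop, if_neg (by omega)]
    have h : ((0 : Int) + 8 - c) / 9 = 0 := by omega
    rw [h]; ring
  | succ n ih =>
    intro t c h0 h8
    rw [getCostOfCoffeLoop]
    have hpos : ((n + 1 : Nat) : Int) > 0 := by exact_mod_cast Nat.succ_pos n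
    rw [if_pos hpos]
    by_cases hc : c = 0
    · rw [if_pos hc]
      have h1 : ((n + 1 : Nat) : Int) - 1 = (n : Int) := by push_cast; ring
      rw [h1, ih t 8 (by norm_num) (by norm_num)]
      subst hc
      have hd : (((n + 1 : Nat) : Int) + 8 - 0) / 9 = ((n : Int) + 8 - 8) / 9 + 1 := by
        push_cast; omega
      rw [hd]; push_cast; ring
    · rw [if_neg hc]
      have h1 : ((n + 1 : Nat) : Int) - 1 = (n : Int) := by push_cast; ring
      rw [h1, ih (t + p) (c - 1) (by omega) (by omega)]
      have hd : (((n + 1 : Nat) : Int) + 8 - c) / 9 = ((n : Int) + 8 - (c - 1)) / 9 := by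
        push_cast; omega
      rw [hd]; push_cast; ring

-- ===== VERDICT (by name: the statement is the Claim_ definition above) =====
theorem getCostOfCoffe_spec : Claim_equal_getCostOfCoffe := by
  intro n p _
  unfold Spec_getCostOfCoffe getCostOfCoffe getCostOfCoffe_alt
  by_cases hn : 0 < n
  · have hk : ((n.toNat : Int)) = n := by omega
    have := getCostOfCoffeLoop_eq p n.toNat 0 8 (by norm_num) (by norm_num)
    rw [hk] at this
    rw [this]
    have hmax : max n 0 = n := by omega
    have hfd : PySem.Int.floordiv n 9 = n / 9 :=
      PySem.Int.floordiv_eq_ediv_of_pos (by norm_num)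
    simp only [hmax, hfd]
    have h9 : (n + 8 - 8) / 9 = n / 9 := by omega
    rw [h9]; ring
  · rw [getCostOfCoffeLoop, if_neg (by omega)]
    have hmax : max n 0 = 0 := by omega
    simp [hmax, PySem.Int.floordiv]
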